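-- pv_equiv track=rewrite | github.com/ark2016/VK-Technopark-project-2024 | data_mining/tests/functions/file_661_680.py | product_of_numbers_in_string
-- ===== SOURCE A (Python) =====
-- def product_of_numbers_in_string(s):
--     if not s:
--         return 1
--     total = 1
--     temp = ""
--     for char in s:
--         if char.isdigit():
--             temp += char
--         elif temp:
--             total *= int(temp)
--             temp = ""
--     if temp:
--         total *= int(temp)
--     return total
-- ===== SOURCE B (Python) =====
-- def product_of_numbers_in_string(s):
--     # tokenize: scan out maximal digit runs by index, then reduce to a product
--     runs = []
--     i, n = 0, len(s)
--     while i < n: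
--         if s[i].isdigit():
--             j = i
--             while j < n and s[j].isdigit():
--                 j += 1
--             runs.append(int(s[i:j]))
--             i = j
--         else:
--             i += 1
--     total = 1
--     for r in runs:
--         total *= r
--     return total
-- ===== Notes on version B (the rewrite author's own statement) =====
-- stated objective: alternative
-- what changed: B tokenizes the string into maximal digit runs with an index scanner and then folds the run list into a product, replacing A's per-character accumulator state machine that carries a pending digit-string through the loop.
import Mathlib
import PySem

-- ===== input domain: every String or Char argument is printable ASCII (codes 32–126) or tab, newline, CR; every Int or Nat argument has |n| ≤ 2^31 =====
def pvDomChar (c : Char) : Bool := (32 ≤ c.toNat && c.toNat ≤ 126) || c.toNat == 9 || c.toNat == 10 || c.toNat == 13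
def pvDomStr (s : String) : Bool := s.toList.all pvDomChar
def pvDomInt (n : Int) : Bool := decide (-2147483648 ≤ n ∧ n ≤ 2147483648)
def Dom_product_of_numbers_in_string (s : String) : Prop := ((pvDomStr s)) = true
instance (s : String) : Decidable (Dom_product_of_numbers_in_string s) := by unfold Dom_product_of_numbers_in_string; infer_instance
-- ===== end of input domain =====

-- B replaces A's per-character pending-digit-string state machine by a tokenizer that
-- extracts the maximal digit runs and then folds the run list into a product (objective: alternative).

-- char.isdigit: exact for the printable-ASCII domain (Python's str.isdigit on one ASCII char is '0'..'9')
def pvDigit (c : Char) : Bool := '0' ≤ c && c ≤ '9'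

-- int(t) for a nonempty run of ASCII digits: exact there (no sign, no underscores, digits only)
def digitsVal (l : List Char) : Int := l.foldl (fun a c => 10 * a + ((c.toNat : Int) - 48)) 0

-- ===== PORT A =====
-- the body of A's for-loop over (total, temp)
def stepA (p : Int × List Char) (c : Char) : Int × List Char :=
  if pvDigit c then (p.1, p.2 ++ [c])
  else if p.2 ≠ [] then (p.1 * digitsVal p.2, ([] : List Char))
  else p
-- A's trailing 'if temp: total *= int(temp)'
def finishA (st : Int × List Char) : Int :=
  if st.2 ≠ [] then st.1 * digitsVal st.2 else st.1

def product_of_numbers_in_string (s : String) : Int :=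
  if s.toList = [] then 1
  else finishA (s.toList.foldl stepA (1, []))

-- ===== PORT B =====
-- B's outer while-loop as structural recursion; the inner while-loop that advances j over
-- the digit run is the takeWhile/dropWhile split of the remaining characters
def pvRuns (l : List Char) : List Int :=
  match l with
  | [] => []
  | c :: rest =>
    if hd : pvDigit c then
      digitsVal (List.takeWhile pvDigit (c :: rest)) :: pvRuns (List.dropWhile pvDigit (c :: rest))
    else
      pvRuns rest
termination_by l.length
decreasing_by
  · simp [hd]
    exact List.length_dropWhile_le _ _
  · simp

def product_of_numbers_in_string_alt (s : String) : Int :=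
  (pvRuns s.toList).foldl (fun a r => a * r) 1

-- ===== PRECONDITION & SPEC =====
def Spec_product_of_numbers_in_string (s : String) (out : Int) : Prop := out = product_of_numbers_in_string_alt s
instance (s : String) (out : Int) : Decidable (Spec_product_of_numbers_in_string s out) := by unfold Spec_product_of_numbers_in_string; infer_instance

-- ===== CLAIM (what is proved, stated in full; the proofs are below) =====
def Claim_equal_product_of_numbers_in_string : Prop := ∀ (s : String), Dom_product_of_numbers_in_string s → Spec_product_of_numbers_in_string s (product_of_numbers_in_string s)

-- ===== LEMMAS AND PROOFS =====

theorem foldl_mul_init (l : List Int) (a : Int) :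
    l.foldl (fun a r => a * r) a = a * l.foldl (fun a r => a * r) 1 := by
  induction l generalizing a with
  | nil => simp
  | cons x xs ih =>
    simp only [List.foldl_cons]
    rw [ih (a * x), ih (1 * x)]
    ring

theorem pvRuns_nil : pvRuns [] = [] := by simp [pvRuns]

theorem pvRuns_cons_nondigit (c : Char) (rest : List Char) (h : pvDigit c = false) :
    pvRuns (c :: rest) = pvRuns rest := by
  rw [pvRuns]; simp [h]

theorem pvRuns_cons_digit (c : Char) (rest : List Char) (h : pvDigit c = true) :
    pvRuns (c :: rest)
      = digitsVal (List.takeWhile pvDigit (c :: rest))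
        :: pvRuns (List.dropWhile pvDigit (c :: rest)) := by
  rw [pvRuns]; simp [h]

theorem pvRuns_digit_run (temp l : List Char) (hall : ∀ c ∈ temp, pvDigit c = true)
    (hne : temp ≠ []) (hl : ∀ c r, l = c :: r → pvDigit c = false) :
    pvRuns (temp ++ l) = digitsVal temp :: pvRuns l := by
  have htake : List.takeWhile pvDigit (temp ++ l) = temp := by
    rw [List.takeWhile_append]
    have h1 : List.takeWhile pvDigit temp = temp := List.takeWhile_eq_self_iff.mpr hall
    rw [h1]
    have h2 : List.takeWhile pvDigit l = [] := by
      cases l with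
      | nil => simp
      | cons c r => simp [List.takeWhile, hl c r rfl]
    simp [h2]
  have hdrop : List.dropWhile pvDigit (temp ++ l) = l := by
    have := List.takeWhile_append_dropWhile (p := pvDigit) (l := temp ++ l)
    rw [htake] at this
    exact List.append_cancel_left this
  cases temp with
  | nil => exact absurd rfl hne
  | cons c0 rest0 =>
    rw [List.cons_append, pvRuns_cons_digit c0 (rest0 ++ l) (hall c0 List.mem_cons_self)]
    rw [← List.cons_append, htake, hdrop]

-- the invariant of A's loop: finishing the fold from state (t, temp) multiplies t by the
-- product of the digit runs of temp ++ l, provided temp holds digits only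
theorem loopA_eq (l : List Char) (t : Int) (temp : List Char)
    (hall : ∀ c ∈ temp, pvDigit c = true) :
    finishA (l.foldl stepA (t, temp))
      = t * (pvRuns (temp ++ l)).foldl (fun a r => a * r) 1 := by
  induction l generalizing t temp with
  | nil =>
    simp only [List.foldl_nil, List.append_nil, finishA]
    by_cases h : temp = []
    · subst h; simp [pvRuns_nil]
    · rw [if_pos h]
      have := pvRuns_digit_run temp [] hall h (by intro c r hcr; simp at hcr)
      rw [List.append_nil] at this
      rw [this, pvRuns_nil]
      simp only [List.foldl_cons, List.foldl_nil]
      ring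
  | cons c rest ih =>
    simp only [List.foldl_cons]
    by_cases hd : pvDigit c
    · rw [show stepA (t, temp) c = (t, temp ++ [c]) by simp [stepA, hd]]
      have := ih t (temp ++ [c]) (by
        intro x hx
        rcases List.mem_append.mp hx with h1 | h1
        · exact hall x h1
        · simp at h1; subst h1; exact hd)
      simpa [List.append_assoc] using this
    · by_cases h : temp = []
      · subst h
        rw [show stepA (t, ([] : List Char)) c = (t, []) by simp [stepA, hd]]
        rw [ih t [] (by intro x hx; simp at hx)]
        simp only [List.nil_append]
        rw [pvRuns_cons_nondigit c rest (by simpa using hd)]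
      · rw [show stepA (t, temp) c = (t * digitsVal temp, []) by simp [stepA, hd, h]]
        rw [ih (t * digitsVal temp) [] (by intro x hx; simp at hx)]
        simp only [List.nil_append]
        rw [show temp ++ c :: rest = temp ++ (c :: rest) from rfl]
        rw [pvRuns_digit_run temp (c :: rest) hall h
          (by intro c' r' hcr; cases hcr; simpa using hd)]
        simp only [List.foldl_cons]
        rw [foldl_mul_init _ (1 * digitsVal temp), pvRuns_cons_nondigit c rest (by simpa using hd)]
        ring

-- ===== VERDICT (by name: the statement is the Claim_ definition above) =====
theorem product_of_numbers_in_string_spec : Claim_equal_product_of_numbers_in_string := by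
  intro s _
  unfold Spec_product_of_numbers_in_string product_of_numbers_in_string product_of_numbers_in_string_alt
  by_cases h : s.toList = []
  · rw [if_pos h, h, pvRuns_nil]; simp
  · rw [if_neg h]
    have := loopA_eq s.toList 1 [] (by intro x hx; simp at hx)
    simpa using this
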